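-- pv_equiv track=rewrite | github.com/ChowderII/GeneticProject | gen6/guessPasswordTest.py | get_fitness
-- ===== SOURCE A (Python) =====
-- def get_fitness(genes):
--     sum = list(map(int, genes))
--     sub = list(map(int, genes))
--     INTGenes = list(map(int, genes))
--
--     fitness = len(genes)
--
--     for i in range(len(genes)):
--         sum[i] = i + INTGenes[i]
--         sub[i] = INTGenes[i] - i
--
--     for i in range(len(genes)):
--         for j in range(len(genes)):
--             if (i == j):
--                 continue
--             if sum[i] == sum[j]:
--                 fitness -= 1
--             if sub[i] == sub[j]:
--                 fitness -= 1
--     return fitness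
-- ===== SOURCE B (Python) =====
-- def get_fitness(genes):
--     # One pass per derived array: count occurrences in a dict, then subtract
--     # c*(c-1) ordered collision pairs per value (O(n) vs A's O(n^2) nested scan).
--     fitness = len(genes)
--     sums = [i + int(g) for i, g in enumerate(genes)]
--     subs = [int(g) - i for i, g in enumerate(genes)]
--     for arr in (sums, subs):
--         counts = {}
--         for v in arr:
--             counts[v] = counts.get(v, 0) + 1
--         for c in counts.values():
--             fitness -= c * (c - 1)
--     return fitness
-- ===== Notes on version B (the rewrite author's own statement) =====
-- stated objective: faster
-- what changed: Replaces the all-pairs nested loop over both derived arrays with a single counting pass per array (dict of frequencies) and subtracts c*(c-1) per value.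
import Mathlib
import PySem

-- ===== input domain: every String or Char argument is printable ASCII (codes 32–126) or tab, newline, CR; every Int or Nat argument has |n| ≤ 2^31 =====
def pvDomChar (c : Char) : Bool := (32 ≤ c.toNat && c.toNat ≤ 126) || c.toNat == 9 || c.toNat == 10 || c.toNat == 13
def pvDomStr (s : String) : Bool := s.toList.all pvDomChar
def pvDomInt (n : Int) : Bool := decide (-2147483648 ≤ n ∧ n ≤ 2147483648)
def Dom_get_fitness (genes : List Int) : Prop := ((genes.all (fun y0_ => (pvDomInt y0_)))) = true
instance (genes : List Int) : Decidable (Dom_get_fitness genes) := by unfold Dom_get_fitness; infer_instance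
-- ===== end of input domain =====

-- B replaces A's all-pairs nested collision scan with one frequency-dict pass per
-- derived array, subtracting c*(c-1) ordered pairs per value (objective: faster).

-- ===== PORT A =====
def get_fitness (genes : List Int) : Int :=
  let INTGenes := genes
  let n := genes.length
  let sum := (List.range n).map (fun (i : ℕ) => (i : Int) + INTGenes.getD i 0)
  let sub := (List.range n).map (fun (i : ℕ) => INTGenes.getD i 0 - (i : Int))
  (List.range n).foldl (fun fitness i =>
    (List.range n).foldl (fun fitness j =>
      if i = j then fitness
      else
        let f1 := if sum.getD i 0 = sum.getD j 0 then fitness - 1 else fitness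
        if sub.getD i 0 = sub.getD j 0 then f1 - 1 else f1) fitness) (n : Int)

-- ===== PORT B =====
def get_fitness_alt (genes : List Int) : Int :=
  let sums := genes.zipIdx.map (fun p => (p.2 : Int) + p.1)
  let subs := genes.zipIdx.map (fun p => p.1 - (p.2 : Int))
  [sums, subs].foldl (fun fitness arr =>
    let counts := arr.foldl (fun d v => d.insert v (d.getD v 0 + 1))
      (PySem.Dict.empty : PySem.Dict Int Int)
    counts.values.foldl (fun f c => f - c * (c - 1)) fitness) (genes.length : Int)

-- ===== PRECONDITION & SPEC =====
def Spec_get_fitness (genes : List Int) (out : Int) : Prop := out = get_fitness_alt genes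
instance (genes : List Int) (out : Int) : Decidable (Spec_get_fitness genes out) := by unfold Spec_get_fitness; infer_instance

-- ===== CLAIM (what is proved, stated in full; the proofs are below) =====
def Claim_equal_get_fitness : Prop := ∀ (genes : List Int), Dom_get_fitness genes → Spec_get_fitness genes (get_fitness genes)

-- ===== LEMMAS AND PROOFS =====

-- the common value both programs subtract per derived list:
-- ∑ over its distinct values of count*(count-1)
def pvColl (l : List Int) : Int :=
  ∑ m ∈ l.toFinset, (l.count m : Int) * ((l.count m : Int) - 1)

def pvSums (genes : List Int) : List Int :=
  (List.range genes.length).map (fun (i : ℕ) => (i : Int) + genes.getD i 0)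

def pvSubs (genes : List Int) : List Int :=
  (List.range genes.length).map (fun (i : ℕ) => genes.getD i 0 - (i : Int))

theorem pv_foldl_sub {α : Type} (g : α → Int) (l : List α) (acc : Int) :
    l.foldl (fun a x => a - g x) acc = acc - (l.map g).sum := by
  induction l generalizing acc with
  | nil => simp
  | cons x t ih => simp [List.foldl_cons, ih]; ring

theorem pv_sum_map_range (n : ℕ) (f : ℕ → Int) :
    ((List.range n).map f).sum = ∑ j ∈ Finset.range n, f j := by
  induction n with
  | zero => simp
  | succ m ih => simp [List.range_succ, Finset.sum_range_succ, ih]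

theorem pv_map_range_getD {β : Type} (l : List Int) (F : Int → β) :
    (List.range l.length).map (fun i => F (l.getD i 0)) = l.map F := by
  apply List.ext_getElem
  · simp
  · intro k h1 h2
    simp only [List.getElem_map, List.getElem_range]
    have h1' : k < l.length := by simpa using h1
    rw [List.getD_eq_getElem?_getD, List.getElem?_eq_getElem h1']
    simp

theorem pv_sum_ite_count (l : List Int) (v : Int) :
    (l.map (fun a => if v = a then (1 : Int) else 0)).sum = l.count v := by
  induction l with
  | nil => simp
  | cons a t ih =>
    simp only [List.map_cons, List.sum_cons, List.count_cons, ih]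
    by_cases h : v = a
    · subst h; simp [add_comm]
    · have hav : ¬ a = v := fun hh => h hh.symm
      simp [h, hav]

-- ∑_{j<n} [l[j] = v] = l.count v, for l of length n
theorem pv_sum_range_eq_count (l : List Int) (v : Int) :
    (∑ j ∈ Finset.range l.length, if v = l.getD j 0 then (1 : Int) else 0) = l.count v := by
  rw [← pv_sum_map_range, pv_map_range_getD l (fun a => if v = a then (1 : Int) else 0)]
  exact pv_sum_ite_count l v

-- per-element penalty: ∑_{a ∈ l} (count a - 1) = pvColl l
theorem pv_sum_count_sub_one (l : List Int) :
    (l.map (fun a => (l.count a : Int) - 1)).sum = pvColl l := by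
  rw [Finset.sum_list_map_count, pvColl]
  refine Finset.sum_congr rfl fun m hm => ?_
  rw [nsmul_eq_mul]

theorem pv_sum_range_count (l : List Int) (n : ℕ) (h : l.length = n) :
    ((List.range n).map (fun i => (l.count (l.getD i 0) : Int) - 1)).sum = pvColl l := by
  subst h
  rw [pv_map_range_getD l (fun a => (l.count a : Int) - 1), pv_sum_count_sub_one]

-- ===== A side =====

theorem pv_inner_fold (s b : List Int) (n : ℕ) (i : ℕ) (fitness : Int) :
    (List.range n).foldl (fun fitness j =>
      if i = j then fitness
      else
        let f1 := if s.getD i 0 = s.getD j 0 then fitness - 1 else fitness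
        if b.getD i 0 = b.getD j 0 then f1 - 1 else f1) fitness
    = fitness - ((List.range n).map (fun j =>
        if i = j then (0 : Int)
        else ((if s.getD i 0 = s.getD j 0 then (1 : Int) else 0) +
              (if b.getD i 0 = b.getD j 0 then (1 : Int) else 0)))).sum := by
  rw [← pv_foldl_sub]
  apply PySem.List.foldl_congr_mem
  intro a x _
  dsimp only
  split_ifs <;> ring

theorem pv_inner_sum (s b : List Int) (n : ℕ) (i : ℕ)
    (hs : s.length = n) (hb : b.length = n) (hi : i < n) :
    ((List.range n).map (fun j =>
        if i = j then (0 : Int)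
        else ((if s.getD i 0 = s.getD j 0 then (1 : Int) else 0) +
              (if b.getD i 0 = b.getD j 0 then (1 : Int) else 0)))).sum
    = ((s.count (s.getD i 0) : Int) - 1) + ((b.count (b.getD i 0) : Int) - 1) := by
  rw [pv_sum_map_range]
  have hsplit : ∀ j, (if i = j then (0 : Int)
        else ((if s.getD i 0 = s.getD j 0 then (1 : Int) else 0) +
              (if b.getD i 0 = b.getD j 0 then (1 : Int) else 0)))
      = ((if s.getD i 0 = s.getD j 0 then (1 : Int) else 0) +
         (if b.getD i 0 = b.getD j 0 then (1 : Int) else 0))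
        - (if i = j then ((if s.getD i 0 = s.getD j 0 then (1 : Int) else 0) +
              (if b.getD i 0 = b.getD j 0 then (1 : Int) else 0)) else 0) := by
    intro j; split_ifs <;> ring
  have e1 : (∑ j ∈ Finset.range n, if s.getD i 0 = s.getD j 0 then (1 : Int) else 0)
      = (s.count (s.getD i 0) : Int) := by
    rw [← hs]; exact pv_sum_range_eq_count s _
  have e2 : (∑ j ∈ Finset.range n, if b.getD i 0 = b.getD j 0 then (1 : Int) else 0)
      = (b.count (b.getD i 0) : Int) := by
    rw [← hb]; exact pv_sum_range_eq_count b _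
  rw [Finset.sum_congr rfl (fun j _ => hsplit j), Finset.sum_sub_distrib,
    Finset.sum_add_distrib, e1, e2, Finset.sum_ite_eq]
  simp only [Finset.mem_range, hi, if_true]
  ring

theorem pv_A_main (s b : List Int) (n : ℕ) (hsl : s.length = n) (hbl : b.length = n) :
    (List.range n).foldl (fun fitness i =>
      (List.range n).foldl (fun fitness j =>
        if i = j then fitness
        else
          let f1 := if s.getD i 0 = s.getD j 0 then fitness - 1 else fitness
          if b.getD i 0 = b.getD j 0 then f1 - 1 else f1) fitness) (n : Int)
    = (n : Int) - pvColl s - pvColl b := by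
  have hstep : ∀ (fitness : Int), ∀ i ∈ List.range n,
      (List.range n).foldl (fun fitness j =>
        if i = j then fitness
        else
          let f1 := if s.getD i 0 = s.getD j 0 then fitness - 1 else fitness
          if b.getD i 0 = b.getD j 0 then f1 - 1 else f1) fitness
      = fitness - (((s.count (s.getD i 0) : Int) - 1) + ((b.count (b.getD i 0) : Int) - 1)) := by
    intro fitness i hi
    rw [pv_inner_fold, pv_inner_sum s b n i hsl hbl (List.mem_range.mp hi)]
  have key : (List.range n).foldl (fun fitness i =>
      (List.range n).foldl (fun fitness j =>
        if i = j then fitness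
        else
          let f1 := if s.getD i 0 = s.getD j 0 then fitness - 1 else fitness
          if b.getD i 0 = b.getD j 0 then f1 - 1 else f1) fitness) (n : Int)
      = (List.range n).foldl (fun fitness i =>
        fitness - (((s.count (s.getD i 0) : Int) - 1)
          + ((b.count (b.getD i 0) : Int) - 1))) (n : Int) := by
    apply PySem.List.foldl_congr_mem
    intro acc i hi
    exact hstep acc i hi
  rw [key, pv_foldl_sub]
  have h1 : ((List.range n).map (fun i =>
      ((s.count (s.getD i 0) : Int) - 1) + ((b.count (b.getD i 0) : Int) - 1))).sum
      = pvColl s + pvColl b := by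
    rw [pv_sum_map_range, Finset.sum_add_distrib, ← pv_sum_map_range, ← pv_sum_map_range,
      pv_sum_range_count s n hsl, pv_sum_range_count b n hbl]
  rw [h1]
  ring

theorem pv_A_eq (genes : List Int) :
    get_fitness genes = (genes.length : Int) - pvColl (pvSums genes) - pvColl (pvSubs genes) := by
  exact pv_A_main (pvSums genes) (pvSubs genes) genes.length (by simp [pvSums]) (by simp [pvSubs])

-- ===== B side =====

theorem pv_nodup_sum (d : List Int) (hd : d.Nodup) (g : Int → Int) :
    (d.map g).sum = ∑ x ∈ d.toFinset, g x := by
  rw [Finset.sum_list_map_count]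
  refine Finset.sum_congr rfl fun m hm => ?_
  rw [List.count_eq_one_of_mem hd (List.mem_toFinset.mp hm), one_nsmul]

theorem pv_toFinset_ofList (l : List Int) :
    (PySem.Set.ofList l : List Int).toFinset = l.toFinset := by
  apply Finset.ext
  intro x
  simp [List.mem_toFinset, PySem.Set.mem_ofList]

theorem pv_counter_values (l : List Int) :
    ((PySem.Dict.counter l : PySem.Dict Int Int).values.map (fun c => c * (c - 1))).sum
      = pvColl l := by
  have hv : (PySem.Dict.counter l : PySem.Dict Int Int).values
      = (PySem.Set.ofList l : List Int).map (fun k => (l.count k : Int)) := by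
    show ((PySem.Dict.counter l).items.map Prod.snd) = _
    rw [PySem.Dict.items_counter, List.map_map]
    rfl
  rw [hv, List.map_map]
  have := pv_nodup_sum (PySem.Set.ofList l) (PySem.Set.nodup_ofList l)
    (fun k => (l.count k : Int) * ((l.count k : Int) - 1))
  rw [show ((fun c => c * (c - 1)) ∘ fun k => (l.count k : Int))
      = fun k => (l.count k : Int) * ((l.count k : Int) - 1) from rfl, this,
    pv_toFinset_ofList, pvColl]

theorem pv_zipIdx_sums (genes : List Int) :
    genes.zipIdx.map (fun p => (p.2 : Int) + p.1) = pvSums genes := by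
  apply List.ext_getElem
  · simp [pvSums]
  · intro k h1 h2
    simp only [pvSums, List.getElem_map, List.getElem_range, List.getElem_zipIdx]
    have hk : k < genes.length := by simpa using h1
    rw [List.getD_eq_getElem?_getD, List.getElem?_eq_getElem hk]
    simp

theorem pv_zipIdx_subs (genes : List Int) :
    genes.zipIdx.map (fun p => p.1 - (p.2 : Int)) = pvSubs genes := by
  apply List.ext_getElem
  · simp [pvSubs]
  · intro k h1 h2
    simp only [pvSubs, List.getElem_map, List.getElem_range, List.getElem_zipIdx]
    have hk : k < genes.length := by simpa using h1
    rw [List.getD_eq_getElem?_getD, List.getElem?_eq_getElem hk]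
    simp

theorem pv_B_eq (genes : List Int) :
    get_fitness_alt genes = (genes.length : Int) - pvColl (pvSums genes) - pvColl (pvSubs genes) := by
  show List.foldl _ (genes.length : Int) [_, _] = _
  simp only [List.foldl_cons, List.foldl_nil]
  rw [PySem.Dict.foldl_insert_getD_add_one_eq_counter,
    PySem.Dict.foldl_insert_getD_add_one_eq_counter,
    pv_foldl_sub, pv_foldl_sub, pv_counter_values, pv_counter_values,
    pv_zipIdx_sums, pv_zipIdx_subs]

-- ===== VERDICT (by name: the statement is the Claim_ definition above) =====
theorem get_fitness_spec : Claim_equal_get_fitness := by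
  intro genes _
  unfold Spec_get_fitness
  rw [pv_A_eq, pv_B_eq]
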